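-- pv_equiv track=rewrite | github.com/olivierzach/AQPy | aqpy/forecast/specs.py | filter_specs
-- ===== SOURCE A (Python) =====
-- def filter_specs(specs, model_names=None, databases=None):
--     selected = specs
--     if model_names:
--         allowed = set(model_names)
--         selected = [s for s in selected if s["model_name"] in allowed]
--     if databases:
--         allowed_db = set(databases)
--         selected = [s for s in selected if s["database"] in allowed_db]
--     return selected
-- ===== SOURCE B (Python) =====
-- def filter_specs(specs, model_names=None, databases=None):
--     # Single explicit loop with an accumulator and continue-style skips,
--     # instead of A's two staged filter comprehensions.
--     allowed = frozenset(model_names) if model_names else None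
--     allowed_db = frozenset(databases) if databases else None
--     out = []
--     for s in specs:
--         if allowed is not None and s["model_name"] not in allowed:
--             continue
--         if allowed_db is not None and s["database"] not in allowed_db:
--             continue
--         out.append(s)
--     return out
-- ===== Notes on version B (the rewrite author's own statement) =====
-- stated objective: alternative
-- what changed: B replaces A's two staged filter comprehensions (each building an intermediate list) with one explicit loop over specs that skips a spec per active filter and appends survivors to an accumulator.
import Mathlib
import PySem

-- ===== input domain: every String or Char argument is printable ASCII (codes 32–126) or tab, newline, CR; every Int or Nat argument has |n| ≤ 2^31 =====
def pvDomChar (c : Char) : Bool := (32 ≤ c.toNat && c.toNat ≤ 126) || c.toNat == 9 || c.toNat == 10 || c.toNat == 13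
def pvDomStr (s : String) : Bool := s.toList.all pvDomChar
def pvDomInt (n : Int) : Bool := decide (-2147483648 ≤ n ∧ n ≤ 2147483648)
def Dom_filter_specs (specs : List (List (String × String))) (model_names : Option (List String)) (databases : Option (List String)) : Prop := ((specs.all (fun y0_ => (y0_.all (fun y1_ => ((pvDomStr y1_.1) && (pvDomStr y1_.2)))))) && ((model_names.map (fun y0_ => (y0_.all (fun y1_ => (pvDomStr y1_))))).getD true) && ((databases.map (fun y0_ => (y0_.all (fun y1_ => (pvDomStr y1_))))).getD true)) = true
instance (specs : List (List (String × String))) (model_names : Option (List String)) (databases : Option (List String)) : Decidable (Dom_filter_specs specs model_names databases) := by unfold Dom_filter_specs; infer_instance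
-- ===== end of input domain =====

-- B replaces A's two staged filter passes by one explicit loop with skip tests; return value only, no speed claim.

-- ===== PORT A =====
-- d[k] for the assoc-list dict: first match; none = KeyError (excluded by Pre_)
def pvLookupA? (s : List (String × String)) (k : String) : Option String :=
  (s.find? (fun p => p.1 == k)).map (·.2)

-- s[k] in allowed — false when the key is missing (Python raises there; outside Pre_)
def pvMemA (s : List (String × String)) (k : String) (allowed : PySem.Set String) : Bool :=
  match pvLookupA? s k with
  | some v => PySem.Set.contains allowed v
  | none => false

def filter_specs (specs : List (List (String × String))) (model_names : Option (List String)) (databases : Option (List String)) : List (List (String × String)) :=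
  let selected := specs
  let selected := match model_names with
    | some (m :: ms) =>
        let allowed := PySem.Set.ofList (m :: ms)
        selected.filter (fun s => pvMemA s "model_name" allowed)
    | _ => selected
  let selected := match databases with
    | some (d :: ds) =>
        let allowed_db := PySem.Set.ofList (d :: ds)
        selected.filter (fun s => pvMemA s "database" allowed_db)
    | _ => selected
  selected

-- ===== PORT B =====
-- 'frozenset(l) if l else None' (truthiness of an Optional list)
def pvActive? (o : Option (List String)) : Option (PySem.Set String) :=
  match o with
  | none => none
  | some l =>
      match l with
      | [] => none
      | x :: xs => some (PySem.Set.ofList (x :: xs))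

-- the loop's 'continue' test: filter active and s[k] not in the set (key missing = Python raises; outside Pre_)
def pvSkipB (al? : Option (PySem.Set String)) (k : String) (s : List (String × String)) : Bool :=
  match al? with
  | none => false
  | some al =>
      match s.lookup k with
      | some v => !PySem.Set.contains al v
      | none => true

-- B's single for-loop: cons the survivor, recurse on the rest
def pvLoopB (al? db? : Option (PySem.Set String)) : List (List (String × String)) → List (List (String × String))
  | [] => []
  | s :: rest =>
    if pvSkipB al? "model_name" s then pvLoopB al? db? rest
    else if pvSkipB db? "database" s then pvLoopB al? db? rest
    else s :: pvLoopB al? db? rest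

def filter_specs_alt (specs : List (List (String × String))) (model_names : Option (List String)) (databases : Option (List String)) : List (List (String × String)) :=
  pvLoopB (pvActive? model_names) (pvActive? databases) specs

-- ===== PRECONDITION & SPEC =====
-- Pre_-side copy of the dict lookup (a shape condition on the input, independent of either port)
def pvLookupP? (s : List (String × String)) (k : String) : Option String :=
  (s.find? (fun p => p.1 == k)).map (·.2)

def pvMemP (s : List (String × String)) (k : String) (allowed : List String) : Bool :=
  match pvLookupP? s k with
  | some v => allowed.contains v
  | none => false

-- does s pass A's model-name filter (trivially, when that filter is inactive)?
def pvPassesMn (model_names : Option (List String)) (s : List (String × String)) : Bool :=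
  match model_names with
  | none => true
  | some [] => true
  | some (m :: ms) => pvMemP s "model_name" (m :: ms)

-- Pre_ excludes exactly the inputs where Python A raises KeyError: with the model filter
-- active a spec missing "model_name", or with the database filter active a spec that
-- passes the model filter but is missing "database".
def Pre_filter_specs (specs : List (List (String × String))) (model_names : Option (List String)) (databases : Option (List String)) : Prop :=
  ((match model_names with | none => false | some [] => false | some (_ :: _) => true) = true →
    specs.all (fun s => (pvLookupP? s "model_name").isSome) = true) ∧
  ((match databases with | none => false | some [] => false | some (_ :: _) => true) = true →
    specs.all (fun s => !pvPassesMn model_names s || (pvLookupP? s "database").isSome) = true)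
instance (specs : List (List (String × String))) (model_names : Option (List String)) (databases : Option (List String)) : Decidable (Pre_filter_specs specs model_names databases) := by unfold Pre_filter_specs; infer_instance

def pvWitness_filter_specs : (List (List (String × String))) × Option (List String) × Option (List String) :=
  ([[("model_name", "a"), ("database", "x")], [("model_name", "b"), ("database", "y")]], some ["a"], some ["x", "y"])

def Spec_filter_specs (specs : List (List (String × String))) (model_names : Option (List String)) (databases : Option (List String)) (out : List (List (String × String))) : Prop := out = filter_specs_alt specs model_names databases
instance (specs : List (List (String × String))) (model_names : Option (List String)) (databases : Option (List String)) (out : List (List (String × String))) : Decidable (Spec_filter_specs specs model_names databases out) := by unfold Spec_filter_specs; infer_instance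

-- ===== CLAIM =====
def Claim_equal_filter_specs : Prop := ∀ (specs : List (List (String × String))) (model_names : Option (List String)) (databases : Option (List String)), Dom_filter_specs specs model_names databases → Pre_filter_specs specs model_names databases → Spec_filter_specs specs model_names databases (filter_specs specs model_names databases)

-- ===== LEMMAS AND PROOFS =====
-- List.lookup (key first, a == p.1) computes A's find?-based dict lookup
theorem lookup_eq_pvLookupA (s : List (String × String)) (k : String) :
    s.lookup k = pvLookupA? s k := by
  induction s with
  | nil => rfl
  | cons p rest ih =>
      simp only [List.lookup, pvLookupA?, List.find?]
      by_cases h : k = p.1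
      · simp [h]
      · have h1 : (k == p.1) = false := by simp [h]
        have h2 : (p.1 == k) = false := by simp [Ne.symm h]
        simp only [h1, h2, if_false, cond_false]
        exact ih

-- B's loop is the composition of the two (possibly trivial) filters, database filter outermost
theorem loopB_eq_filters (al? db? : Option (PySem.Set String)) (specs : List (List (String × String))) :
    pvLoopB al? db? specs =
      (specs.filter (fun s => !pvSkipB al? "model_name" s)).filter (fun s => !pvSkipB db? "database" s) := by
  induction specs with
  | nil => rfl
  | cons s rest ih =>
      simp only [pvLoopB, List.filter]
      by_cases h1 : pvSkipB al? "model_name" s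
      · simp [h1, ih]
      · by_cases h2 : pvSkipB db? "database" s
        · simp [h1, h2, ih]
        · simp [h1, h2, ih]

-- with the filter inactive B's skip test is constantly false; active: skip = not-member
theorem not_skip_none (k : String) (s : List (String × String)) :
    (!pvSkipB none k s) = true := rfl

theorem not_skip_some (al : PySem.Set String) (k : String) (s : List (String × String)) :
    (!pvSkipB (some al) k s) = pvMemA s k al := by
  simp only [pvSkipB, pvMemA, lookup_eq_pvLookupA]
  cases pvLookupA? s k <;> simp

-- ===== VERDICT =====
theorem filter_specs_spec : Claim_equal_filter_specs := by
  intro specs model_names databases _ _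
  unfold Spec_filter_specs filter_specs filter_specs_alt pvActive?
  rw [loopB_eq_filters]
  match model_names, databases with
  | none, none => simp [not_skip_none]
  | none, some [] => simp [not_skip_none]
  | some [], none => simp [not_skip_none]
  | some [], some [] => simp [not_skip_none]
  | some (m :: ms), none => simp [not_skip_none, not_skip_some]
  | some (m :: ms), some [] => simp [not_skip_none, not_skip_some]
  | none, some (d :: ds) => simp [not_skip_none, not_skip_some]
  | some [], some (d :: ds) => simp [not_skip_none, not_skip_some]
  | some (m :: ms), some (d :: ds) => simp [not_skip_some]
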